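-- pv_equiv track=rewrite | github.com/mlcodooorrr/webgpu_neuralphotos | train_gan.py | get_num_generated_frames
-- ===== SOURCE A (Python) =====
-- def get_num_generated_frames(epoch, sampling_schedule):
--     """
--     Determine how many frames to replace with generated ones based on epoch
--     """
--     num_frames = 0
--     for epoch_threshold, frames in sorted(sampling_schedule.items()):
--         if epoch >= epoch_threshold:
--             num_frames = frames
--         else:
--             break
--     return num_frames
-- ===== SOURCE B (Python) =====
-- def get_num_generated_frames(epoch, sampling_schedule):
--     """
--     Determine how many frames to replace with generated ones based on epoch
--     (single linear pass: pick the frames of the largest threshold <= epoch).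
--     """
--     best_threshold = None
--     num_frames = 0
--     for threshold, frames in sampling_schedule.items():
--         if threshold <= epoch and (best_threshold is None or threshold > best_threshold):
--             best_threshold = threshold
--             num_frames = frames
--     return num_frames
-- ===== Notes on version B (the rewrite author's own statement) =====
-- stated objective: faster
-- what changed: Replaces sort-then-scan-with-break (O(n log n)) by a single unsorted linear pass that keeps the largest threshold <= epoch seen so far and its frames value.
import Mathlib
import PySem

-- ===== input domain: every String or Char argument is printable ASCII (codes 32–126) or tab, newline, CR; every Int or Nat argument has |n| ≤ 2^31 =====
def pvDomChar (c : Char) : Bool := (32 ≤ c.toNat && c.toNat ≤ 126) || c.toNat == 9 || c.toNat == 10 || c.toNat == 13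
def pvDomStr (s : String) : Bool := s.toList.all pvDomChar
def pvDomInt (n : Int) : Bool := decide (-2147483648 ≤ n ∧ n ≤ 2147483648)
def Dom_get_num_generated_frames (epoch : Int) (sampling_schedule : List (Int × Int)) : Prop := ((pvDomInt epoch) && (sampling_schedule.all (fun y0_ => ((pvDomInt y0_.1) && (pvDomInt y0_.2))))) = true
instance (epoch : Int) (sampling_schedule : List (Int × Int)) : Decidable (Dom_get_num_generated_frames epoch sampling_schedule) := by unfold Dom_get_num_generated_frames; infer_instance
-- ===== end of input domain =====

-- B replaces A's sort-then-break scan by one unsorted linear pass keeping the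
-- largest threshold ≤ epoch (objective: faster — one O(n) pass instead of sorting).

-- ===== PORT A =====
-- the 'for … in sorted(...): if epoch >= t: num_frames = f else: break' loop
def pvALoop (epoch : Int) (num : Int) : List (Int × Int) → Int
  | [] => num
  | (t, f) :: rest => if epoch ≥ t then pvALoop epoch f rest else num

-- sorted(sampling_schedule.items()) compares (threshold, frames) tuples: sorted2
def get_num_generated_frames (epoch : Int) (sampling_schedule : List (Int × Int)) : Int :=
  pvALoop epoch 0 (PySem.List.sorted2 sampling_schedule (fun p => p.1) (fun p => p.2))

-- ===== PORT B =====
-- state = (best_threshold : Option Int, num_frames); one fold over the unsorted list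
def pvBStep (epoch : Int) (st : Option Int × Int) (p : Int × Int) : Option Int × Int :=
  if (decide (p.1 ≤ epoch) && (match st.1 with | none => true | some b => decide (b < p.1))) = true
  then (some p.1, p.2) else st

def get_num_generated_frames_alt (epoch : Int) (sampling_schedule : List (Int × Int)) : Int :=
  (sampling_schedule.foldl (pvBStep epoch) ((none : Option Int), (0 : Int))).2

-- ===== PRECONDITION & SPEC =====
-- Pre_ requires pairwise-distinct thresholds: this is the invariant of the Python
-- dict argument (an association list with duplicate keys does not encode a dict).
def Pre_get_num_generated_frames (epoch : Int) (sampling_schedule : List (Int × Int)) : Prop :=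
  (sampling_schedule.map Prod.fst).Nodup
instance (epoch : Int) (sampling_schedule : List (Int × Int)) : Decidable (Pre_get_num_generated_frames epoch sampling_schedule) := by unfold Pre_get_num_generated_frames; infer_instance

def pvWitness_get_num_generated_frames : Int × (List (Int × Int)) := (5, [(1, 2), (10, 3)])

def Spec_get_num_generated_frames (epoch : Int) (sampling_schedule : List (Int × Int)) (out : Int) : Prop := out = get_num_generated_frames_alt epoch sampling_schedule
instance (epoch : Int) (sampling_schedule : List (Int × Int)) (out : Int) : Decidable (Spec_get_num_generated_frames epoch sampling_schedule out) := by unfold Spec_get_num_generated_frames; infer_instance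

-- ===== CLAIM (what is proved, stated in full; the proofs are below) =====
def Claim_equal_get_num_generated_frames : Prop := ∀ (epoch : Int) (sampling_schedule : List (Int × Int)), Dom_get_num_generated_frames epoch sampling_schedule → Pre_get_num_generated_frames epoch sampling_schedule → Spec_get_num_generated_frames epoch sampling_schedule (get_num_generated_frames epoch sampling_schedule)

-- ===== LEMMAS AND PROOFS =====

-- insertBy only looks at comparisons of x with members of ys
theorem pv_insertBy_congr {α : Type} (b1 b2 : α → α → Bool) (x : α) (ys : List α)
    (h : ∀ y ∈ ys, b1 x y = b2 x y) :
    PySem.List.insertBy b1 x ys = PySem.List.insertBy b2 x ys := by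
  induction ys with
  | nil => rfl
  | cons y ys ih =>
    simp only [PySem.List.insertBy]
    rw [h y (by simp)]
    split
    · rfl
    · rw [ih (fun z hz => h z (by simp [hz]))]

theorem pv_foldl_insertBy_congr {α : Type} (b1 b2 : α → α → Bool) (S : List α)
    (h : ∀ x ∈ S, ∀ y ∈ S, b1 x y = b2 x y) :
    ∀ (l acc : List α), (∀ x ∈ l, x ∈ S) → (∀ x ∈ acc, x ∈ S) →
    l.foldl (fun acc x => PySem.List.insertBy b1 x acc) acc
      = l.foldl (fun acc x => PySem.List.insertBy b2 x acc) acc := by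
  intro l
  induction l with
  | nil => intro acc _ _; rfl
  | cons x xs ih =>
    intro acc hl hacc
    have hx : x ∈ S := hl x (by simp)
    simp only [List.foldl_cons]
    rw [pv_insertBy_congr b1 b2 x acc (fun y hy => h x hx y (hacc y hy))]
    exact ih _ (fun z hz => hl z (by simp [hz]))
      (fun z hz => by
        rcases (PySem.List.mem_insertBy _ _ _ _).mp hz with h' | h'
        · exact h' ▸ hx
        · exact hacc z h')

-- with pairwise-distinct keys the tuple comparison never reaches the second component
theorem pv_sorted2_eq_sorted (l : List (Int × Int))
    (h : (l.map Prod.fst).Nodup) :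
    PySem.List.sorted2 l (fun p => p.1) (fun p => p.2)
      = PySem.List.sorted l (fun p => p.1) := by
  have hinj : ∀ x ∈ l, ∀ y ∈ l, x.1 = y.1 → x = y := by
    intro x hx y hy hxy
    exact List.inj_on_of_nodup_map h hx hy hxy
  have hlhs : PySem.List.sorted2 l (fun p => p.1) (fun p => p.2)
      = l.foldl (fun acc x => PySem.List.insertBy
          (fun a b => decide (a.1 < b.1) || (!decide (b.1 < a.1) && decide (a.2 < b.2))) x acc) [] := rfl
  rw [hlhs, PySem.List.sorted_eq_foldl_insertBy]
  apply pv_foldl_insertBy_congr _ _ l _ l [] (fun x hx => hx) (by simp)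
  intro x hx y hy
  rcases lt_trichotomy x.1 y.1 with hc | hc | hc
  · simp [hc]
  · have hxy : x = y := hinj x hx y hy hc
    subst hxy
    simp
  · simp [hc, not_lt_of_gt hc]

-- no element qualifies ⇒ the B fold is the identity
theorem pv_noQual (epoch : Int) : ∀ (l : List (Int × Int)) (st : Option Int × Int),
    (∀ p ∈ l, ¬ p.1 ≤ epoch) → l.foldl (pvBStep epoch) st = st := by
  intro l
  induction l with
  | nil => intro st _; rfl
  | cons p rest ih =>
    intro st h
    have hp : ¬ p.1 ≤ epoch := h p (by simp)
    simp only [List.foldl_cons]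
    have : pvBStep epoch st p = st := by
      simp [pvBStep, hp]
    rw [this]
    exact ih st (fun q hq => h q (by simp [hq]))

-- on a key-strictly-increasing list, A's break-loop agrees with B's fold
theorem pv_loop_agree (epoch : Int) : ∀ (l : List (Int × Int)) (bt : Option Int) (acc : Int),
    l.Pairwise (fun a b => a.1 < b.1) →
    (∀ p ∈ l, ∀ b, bt = some b → b < p.1) →
    pvALoop epoch acc l = (l.foldl (pvBStep epoch) (bt, acc)).2 := by
  intro l
  induction l with
  | nil => intro bt acc _ _; rfl
  | cons p rest ih =>
    rcases p with ⟨t, f⟩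
    intro bt acc hpw hbt
    have hhead : ∀ q ∈ rest, t < q.1 := by
      have := List.pairwise_cons.mp hpw
      exact fun q hq => this.1 q hq
    have hrest : rest.Pairwise (fun a b => a.1 < b.1) := (List.pairwise_cons.mp hpw).2
    by_cases ht : t ≤ epoch
    · have hstep : pvBStep epoch (bt, acc) (t, f) = (some t, f) := by
        rcases bt with _ | b
        · simp [pvBStep, ht]
        · have hb : b < t := hbt (t, f) (by simp) b rfl
          simp [pvBStep, ht, hb]
      have hA : pvALoop epoch acc ((t, f) :: rest) = pvALoop epoch f rest := by
        simp [pvALoop, ht]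
      rw [hA]
      simp only [List.foldl_cons, hstep]
      exact ih (some t) f hrest
        (fun q hq b hb => by injection hb with hb; exact hb ▸ hhead q hq)
    · have hA : pvALoop epoch acc ((t, f) :: rest) = acc := by
        simp [pvALoop]
        intro h; exact absurd h ht
      have hstep : pvBStep epoch (bt, acc) (t, f) = (bt, acc) := by
        simp [pvBStep, ht]
      rw [hA]
      simp only [List.foldl_cons, hstep]
      rw [pv_noQual epoch rest (bt, acc)
        (fun q hq hle => ht (le_trans (le_of_lt (hhead q hq)) hle))]

-- pvBStep commutes on pairs that are equal or have distinct keys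
theorem pv_bstep_comm (epoch : Int) (x y : Int × Int) (hxy : x.1 = y.1 → x = y)
    (st : Option Int × Int) :
    pvBStep epoch (pvBStep epoch st x) y = pvBStep epoch (pvBStep epoch st y) x := by
  by_cases hx : x = y
  · rw [hx]
  · have hne : x.1 ≠ y.1 := fun h => hx (hxy h)
    rcases st with ⟨bt, f0⟩
    rcases x with ⟨x1, x2⟩
    rcases y with ⟨y1, y2⟩
    simp only [ne_eq] at hne
    rcases bt with _ | b <;>
      simp only [pvBStep, Bool.and_eq_true, decide_eq_true_eq] <;>
      split_ifs <;> simp_all <;> omega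

-- ===== VERDICT (by name: the statement is the Claim_ definition above) =====
theorem get_num_generated_frames_spec : Claim_equal_get_num_generated_frames := by
  intro epoch l _hdom hpre
  unfold Spec_get_num_generated_frames
  unfold get_num_generated_frames get_num_generated_frames_alt
  have hpre' : (l.map Prod.fst).Nodup := hpre
  rw [pv_sorted2_eq_sorted l hpre']
  set ss := PySem.List.sorted l (fun p => p.1) with hss
  have hperm : ss.Perm l := PySem.List.sorted_perm l (fun p => p.1) false
  have hle : ss.Pairwise (fun a b => a.1 ≤ b.1) := PySem.List.sorted_pairwise l (fun p => p.1)
  have hnodup : (ss.map Prod.fst).Nodup :=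
    ((hperm.map Prod.fst).nodup_iff).mpr hpre'
  have hnepw : ss.Pairwise (fun a b => a.1 ≠ b.1) := by
    have h' : (ss.map Prod.fst).Pairwise (fun a b => a ≠ b) := hnodup
    exact List.pairwise_map.mp h'
  have hlt : ss.Pairwise (fun a b => a.1 < b.1) :=
    (hle.and hnepw).imp (fun h => lt_of_le_of_ne h.1 h.2)
  rw [pv_loop_agree epoch ss none 0 hlt (fun p _ b hb => by exact absurd hb (by simp))]
  congr 1
  apply hperm.foldl_eq'
  intro x hx y hy z
  exact pv_bstep_comm epoch x y
    (fun h => List.inj_on_of_nodup_map hnodup hx hy h) z
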